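-- pv_equiv track=rewrite | github.com/darinddv/polychrom | examples/tutorial_multichain.py | create_chain_topology
-- ===== SOURCE A (Python) =====
-- def create_chain_topology(chain_sizes):
--     """Create chain topology specification for forcekits.polymer_chains."""
--     chains = []
--     start = 0
--
--     for size in chain_sizes:
--         end = start + size
--         chains.append((start, end, False))  # (start, end, is_ring)
--         start = end
--
--     return chains
-- ===== SOURCE B (Python) =====
-- def create_chain_topology(chain_sizes):
--     """Create chain topology specification for forcekits.polymer_chains."""
--     return [(sum(chain_sizes[:i]), sum(chain_sizes[:i + 1]), False)
--             for i in range(len(chain_sizes))]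
-- ===== Notes on version B (the rewrite author's own statement) =====
-- stated objective: alternative
-- what changed: Replaces the accumulator-threaded loop with a per-index closed form: chain i is (sum of the first i sizes, sum of the first i+1 sizes, False), recomputing each prefix sum from a slice instead of carrying running state.
import Mathlib
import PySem

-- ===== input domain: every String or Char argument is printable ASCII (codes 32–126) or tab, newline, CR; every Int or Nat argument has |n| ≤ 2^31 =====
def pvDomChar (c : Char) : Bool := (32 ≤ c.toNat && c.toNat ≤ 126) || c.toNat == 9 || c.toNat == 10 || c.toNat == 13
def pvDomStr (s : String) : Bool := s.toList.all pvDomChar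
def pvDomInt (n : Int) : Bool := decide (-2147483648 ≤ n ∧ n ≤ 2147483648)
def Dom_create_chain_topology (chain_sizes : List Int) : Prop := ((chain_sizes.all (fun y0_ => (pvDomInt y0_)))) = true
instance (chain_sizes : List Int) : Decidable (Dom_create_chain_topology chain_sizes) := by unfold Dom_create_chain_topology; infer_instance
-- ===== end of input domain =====

-- B replaces A's running-accumulator loop by a per-index closed form (each chain's endpoints are prefix sums of slices); objective: alternative, not faster.


-- ===== PORT A =====
-- loop: for size in chain_sizes: append (start, start+size, False); start = start+size
def ccTopoLoop : List Int → Int → List (Int × Int × Bool)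
  | [], _ => []
  | size :: rest, start => (start, start + size, false) :: ccTopoLoop rest (start + size)

def create_chain_topology (chain_sizes : List Int) : List (Int × Int × Bool) :=
  ccTopoLoop chain_sizes 0

-- ===== PORT B =====
-- [(sum(cs[:i]), sum(cs[:i+1]), False) for i in range(len(cs))]
-- cs[:i] for 0 ≤ i is exactly List.take i; range(len(cs)) is List.range cs.length.
def create_chain_topology_alt (chain_sizes : List Int) : List (Int × Int × Bool) :=
  (List.range chain_sizes.length).map
    (fun i => ((chain_sizes.take i).sum, (chain_sizes.take (i + 1)).sum, false))

-- ===== PRECONDITION & SPEC =====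
def Spec_create_chain_topology (chain_sizes : List Int) (out : List (Int × Int × Bool)) : Prop := out = create_chain_topology_alt chain_sizes
instance (chain_sizes : List Int) (out : List (Int × Int × Bool)) : Decidable (Spec_create_chain_topology chain_sizes out) := by unfold Spec_create_chain_topology; infer_instance

-- ===== CLAIM (what is proved, stated in full; the proofs are below) =====
def Claim_equal_create_chain_topology : Prop := ∀ (chain_sizes : List Int), Dom_create_chain_topology chain_sizes → Spec_create_chain_topology chain_sizes (create_chain_topology chain_sizes)

-- ===== LEMMAS AND PROOFS =====
theorem ccTopoLoop_eq (chain_sizes : List Int) : ∀ start : Int,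
    ccTopoLoop chain_sizes start =
      (List.range chain_sizes.length).map
        (fun i => (start + (chain_sizes.take i).sum, start + (chain_sizes.take (i + 1)).sum, false)) := by
  induction chain_sizes with
  | nil => intro start; simp [ccTopoLoop]
  | cons x xs ih =>
    intro start
    have h : ccTopoLoop (x :: xs) start
        = (start, start + x, false) :: ccTopoLoop xs (start + x) := rfl
    rw [h, ih (start + x)]
    simp only [List.length_cons, List.range_succ_eq_map, List.map_cons, List.map_map]
    congr 1
    · simp
    · apply List.map_congr_left
      intro i _
      simp [Function.comp, add_assoc]

-- ===== VERDICT (by name: the statement is the Claim_ definition above) =====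
theorem create_chain_topology_spec : Claim_equal_create_chain_topology := by
  intro cs _
  unfold Spec_create_chain_topology create_chain_topology create_chain_topology_alt
  rw [ccTopoLoop_eq cs 0]
  simp
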